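-- pv_equiv track=rewrite | github.com/rayz1065/competitive-programming | advent_of_code/2023/day_23/main.py | part_1
-- ===== SOURCE A (Python) =====
-- MOV = [
--     (0, 1),
--     (1, 0),
--     (0, -1),
--     (-1, 0),
-- ]
--
-- SLOPES = {
--     ">": [(0, 1)],
--     "<": [(0, -1)],
--     "v": [(1, 0)],
--     "^": [(-1, 0)],
--     "*": [],  # dry slope, used to compute explicit graph
-- }
--
-- def get_empty(grid, row):
--     return row, grid[row].index(".")
--
-- def in_range(grid, r, c):
--     return 0 <= r < len(grid) and 0 <= c < len(grid[r])
--
-- def adj(grid, r, c):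
--     if grid[r][c] in SLOPES:
--         directions = SLOPES[grid[r][c]]
--     else:
--         directions = MOV
--
--     for dr, dc in directions:
--         new_r, new_c = r + dr, c + dc
--         if not in_range(grid, new_r, new_c):
--             continue
--
--         cell = grid[new_r][new_c]
--         if cell == "#":
--             continue
--
--         if cell != "*" and cell in SLOPES and (dr, dc) not in SLOPES[cell]:
--             continue
--
--         yield new_r, new_c
--
-- def _topological_sort(grid, r, c, visited, stack):
--     if (r, c) in visited:
--         return
--
--     visited.add((r, c))
--     assert grid[r][c] != "#"
--
--     for new_r, new_c in adj(grid, r, c):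
--         _topological_sort(grid, new_r, new_c, visited, stack)
--
--     stack.append((r, c))
--
-- def topological_sort(grid):
--     r, c = get_empty(grid, 0)
--     visited = set()
--     stack = []
--
--     _topological_sort(grid, r, c, visited, stack)
--     return stack
--
-- def part_1(grid):
--     stack = topological_sort(grid)
--
--     distances = {stack[0]: 0}
--     for r, c in stack[1:]:
--         distance = -1
--         for new_r, new_c in adj(grid, r, c):
--             if (new_r, new_c) not in distances:
--                 continue
--
--             distance = max(distance, distances[new_r, new_c] + 1)
--         distances[r, c] = distance
--
--     return distances[get_empty(grid, 0)]
-- ===== SOURCE B (Python) =====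
-- ARROWS = {">": (0, 1), "<": (0, -1), "v": (1, 0), "^": (-1, 0)}
--
-- def _at(grid, r, c):
--     if 0 <= r < len(grid) and 0 <= c < len(grid[r]):
--         return grid[r][c]
--     return None
--
-- def _neighbors(grid, r, c):
--     ch = grid[r][c]
--     if ch in ARROWS:
--         dirs = [ARROWS[ch]]
--     elif ch == "*":
--         dirs = []
--     else:
--         dirs = [(0, 1), (1, 0), (0, -1), (-1, 0)]
--     out = []
--     for dr, dc in dirs:
--         cell = _at(grid, r + dr, c + dc)
--         if cell is None or cell == "#":
--             continue
--         if cell in ARROWS and ARROWS[cell] != (dr, dc):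
--             continue
--         out.append((r + dr, c + dc))
--     return out
--
-- def part_1(grid):
--     # Iterative post-order DFS (explicit frame stack) instead of A's recursive
--     # topological sort, then memoized recursion over positions in the order
--     # instead of A's forward DP loop.
--     start = (0, grid[0].index("."))
--     order = []
--     visited = {start}
--     frames = [(start, _neighbors(grid, *start))]
--     while frames:
--         node, pend = frames.pop()
--         if not pend:
--             order.append(node)
--         else:
--             nb, rest = pend[0], pend[1:]
--             frames.append((node, rest))
--             if nb not in visited:
--                 visited.add(nb)
--                 frames.append((nb, _neighbors(grid, *nb)))
--
--     pos = {node: i for i, node in enumerate(order)}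
--     memo = {}
--
--     def dist(i):
--         if i in memo:
--             return memo[i]
--         if i == 0:
--             res = 0
--         else:
--             r, c = order[i]
--             res = -1
--             for nb in _neighbors(grid, r, c):
--                 j = pos[nb]
--                 if j < i:
--                     res = max(res, dist(j) + 1)
--         memo[i] = res
--         return res
--
--     return dist(len(order) - 1)
-- ===== Notes on version B (the rewrite author's own statement) =====
-- stated objective: alternative
-- what changed: A's recursive topological sort is replaced by an iterative post-order DFS over an explicit frame stack with its own bounds-checked adjacency helper, and A's forward DP loop over the stack is replaced by a memoized recursive dist(i) over positions in the order (base dist(0)=0, following only edges that go backward in the order).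
-- outside the precondition, e.g. on part_1([]): A raises IndexError, B raises IndexError; on part_1(['##']): A raises ValueError, B raises ValueError
import Mathlib
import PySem

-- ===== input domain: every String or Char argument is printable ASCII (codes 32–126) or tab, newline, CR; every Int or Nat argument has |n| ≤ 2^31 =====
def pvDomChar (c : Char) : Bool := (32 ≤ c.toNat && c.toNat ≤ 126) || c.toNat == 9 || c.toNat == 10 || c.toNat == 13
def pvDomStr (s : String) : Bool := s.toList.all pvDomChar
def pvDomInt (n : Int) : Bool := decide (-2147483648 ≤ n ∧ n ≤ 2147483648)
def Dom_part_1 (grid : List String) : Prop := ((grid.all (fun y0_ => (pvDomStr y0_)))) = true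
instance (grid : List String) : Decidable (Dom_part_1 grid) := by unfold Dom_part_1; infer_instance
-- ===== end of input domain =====

-- B replaces A's recursive topological sort by an iterative post-order DFS over
-- an explicit frame stack, and A's forward DP loop by a memoized recursive
-- dist(i) over positions in the order (alternative decomposition, same cost).

-- ===== PORT A =====
def pvMOV : List (Int × Int) := [(0, 1), (1, 0), (0, -1), (-1, 0)]

-- SLOPES as a function: `some ds` iff the char is a key of SLOPES
def pvSlopes (ch : Char) : Option (List (Int × Int)) :=
  if ch = '>' then some [(0, 1)]
  else if ch = '<' then some [(0, -1)]
  else if ch = 'v' then some [(1, 0)]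
  else if ch = '^' then some [(-1, 0)]
  else if ch = '*' then some []
  else none

def pvRow (grid : List String) (r : Int) : List Char :=
  ((PySem.List.pyGet? grid r).getD "").toList

-- grid[r][c]; every access is range-guarded in A, so the defaults are unreachable
def pvCell (grid : List String) (r c : Int) : Char :=
  (PySem.List.pyGet? (pvRow grid r) c).getD '#'

def pvInRange (grid : List String) (r c : Int) : Bool :=
  decide (0 ≤ r) && decide (r < PySem.List.len grid) &&
    decide (0 ≤ c) && decide (c < PySem.List.len (pvRow grid r))

-- adj(grid, r, c) as the list of yielded pairs
def pvAdj (grid : List String) (r c : Int) : List (Int × Int) :=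
  let dirs := match pvSlopes (pvCell grid r c) with
    | some ds => ds
    | none => pvMOV
  dirs.foldl (fun acc d =>
    let nr := r + d.1
    let nc := c + d.2
    if !(pvInRange grid nr nc) then acc
    else
      let cell := pvCell grid nr nc
      if cell = '#' then acc
      else if cell ≠ '*' ∧ (pvSlopes cell).isSome ∧ d ∉ (pvSlopes cell).getD [] then acc
      else acc ++ [(nr, nc)]) []

-- get_empty: Python's str.index raises when '.' is absent (excluded by Pre_; find = index otherwise)
def pvGetEmpty (grid : List String) (row : Int) : Int × Int :=
  (row, PySem.Str.find ((PySem.List.pyGet? grid row).getD "") ".")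

-- the recursive _topological_sort, encoded with an explicit work list:
-- `visit` enters a cell (checking `visited` first), `emit` appends it to the
-- stack after all its neighbours have been processed — the exact post-order.
inductive PvEnt where
  | visit : Int → Int → PvEnt
  | emit : Int → Int → PvEnt
deriving DecidableEq, Repr

def pvAllCells (grid : List String) : List (Int × Int) :=
  (List.range grid.length).flatMap
    (fun r => (List.range (grid.getD r "").toList.length).map (fun c => ((r : Int), (c : Int))))

def pvUnvis (grid : List String) (visited : PySem.Set (Int × Int)) : Nat :=
  ((pvAllCells grid).filter (fun p => !(PySem.Set.contains visited p))).length

lemma pvMem_allCells_of_inRange (grid : List String) (r c : Int)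
    (h : pvInRange grid r c = true) : (r, c) ∈ pvAllCells grid := by
  simp only [pvInRange, PySem.List.len_eq, Bool.and_eq_true, decide_eq_true_eq] at h
  obtain ⟨⟨⟨hr0, hrl⟩, hc0⟩, hcl⟩ := h
  simp only [pvAllCells, List.mem_flatMap, List.mem_range, List.mem_map]
  have hrow : pvRow grid r = (grid.getD r.toNat "").toList := by
    simp only [pvRow]
    rw [PySem.List.pyGet?_of_nonneg (h := hr0)]
    simp [List.getD, List.getElem?_eq_getElem (by omega : r.toNat < grid.length)]
  rw [hrow] at hcl
  refine ⟨r.toNat, by omega, (c.toNat : Int), ?_, by simp [Int.toNat_of_nonneg hr0, Int.toNat_of_nonneg hc0]⟩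
  exact List.mem_flatMap.2 ⟨c.toNat, List.mem_range.2 (by omega), by simp⟩

lemma pvUnvis_lt (grid : List String) (visited : PySem.Set (Int × Int)) (r c : Int)
    (hin : pvInRange grid r c = true) (hnv : ¬ PySem.Set.contains visited (r, c) = true) :
    pvUnvis grid (PySem.Set.add visited (r, c)) < pvUnvis grid visited := by
  have hx : (r, c) ∈ pvAllCells grid := pvMem_allCells_of_inRange grid r c hin
  obtain ⟨l₁, l₂, hsplit⟩ := List.append_of_mem hx
  have himp : ∀ y : Int × Int, (!(PySem.Set.contains (PySem.Set.add visited (r, c)) y)) = true →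
      (!(PySem.Set.contains visited y)) = true := by
    intro y hy
    simp only [Bool.not_eq_true'] at hy ⊢
    simp only [pysem] at hy ⊢
    simp_all
  have hxf : (!(PySem.Set.contains (PySem.Set.add visited (r, c)) (r, c))) = false := by
    simp [pysem, PySem.Set.mem_add]
  have hxt : (!(PySem.Set.contains visited (r, c))) = true := by
    cases h' : PySem.Set.contains visited (r, c) with
    | false => rfl
    | true => exact absurd h' hnv
  simp only [pvUnvis, ← List.countP_eq_length_filter, hsplit, List.countP_append, List.countP_cons]
  have h1 := List.countP_mono_left (l := l₁) (p := fun y => !(PySem.Set.contains (PySem.Set.add visited (r, c)) y)) (q := fun y => !(PySem.Set.contains visited y)) (fun a _ => himp a)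
  have h2 := List.countP_mono_left (l := l₂) (p := fun y => !(PySem.Set.contains (PySem.Set.add visited (r, c)) y)) (q := fun y => !(PySem.Set.contains visited y)) (fun a _ => himp a)
  have hif1 : (if (!(PySem.Set.contains (PySem.Set.add visited (r, c)) (r, c))) = true then 1 else 0) = 0 := by
    rw [hxf]; simp
  have hif2 : (if (!(PySem.Set.contains visited (r, c))) = true then 1 else 0) = 1 := by
    rw [hxt]; simp
  simp only [hif1, hif2]
  omega

def pvTsortLoop (grid : List String) :
    List PvEnt → PySem.Set (Int × Int) → List (Int × Int) →
      PySem.Set (Int × Int) × List (Int × Int)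
  | [], visited, stack => (visited, stack)
  | PvEnt.emit r c :: rest, visited, stack => pvTsortLoop grid rest visited (stack ++ [(r, c)])
  | PvEnt.visit r c :: rest, visited, stack =>
      if hv : PySem.Set.contains visited (r, c) then
        pvTsortLoop grid rest visited stack
      else if hin : pvInRange grid r c then
        -- the range guard only makes the recursion total; every `visit` entry is
        -- in range (the start cell by Pre_, the rest because adj yields in-range cells)
        pvTsortLoop grid ((pvAdj grid r c).map (fun p => PvEnt.visit p.1 p.2) ++ PvEnt.emit r c :: rest)
          (PySem.Set.add visited (r, c)) stack
      else
        pvTsortLoop grid rest visited stack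
  termination_by pending visited _ => (pvUnvis grid visited, pending.length)
  decreasing_by
  · exact Prod.Lex.right _ (by simp)
  · exact Prod.Lex.right _ (by simp)
  · exact Prod.Lex.left _ _ (pvUnvis_lt grid visited r c hin hv)
  · exact Prod.Lex.right _ (by simp)

def pvTopoStack (grid : List String) : List (Int × Int) :=
  let s := pvGetEmpty grid 0
  (pvTsortLoop grid [PvEnt.visit s.1 s.2] PySem.Set.empty []).2

def part_1 (grid : List String) : Int :=
  let stack := pvTopoStack grid
  match stack with
  | [] => 0   -- unreachable under Pre_: the stack always contains the start cell
  | first :: rest =>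
    let distances := rest.foldl (fun d p =>
        PySem.Dict.insert d p ((pvAdj grid p.1 p.2).foldl (fun dist nb =>
          match PySem.Dict.get? d nb with
          | none => dist
          | some v => max dist (v + 1)) (-1))) ((PySem.Dict.empty).insert first 0)
    PySem.Dict.getD distances (pvGetEmpty grid 0) 0

-- ===== PORT B =====
-- ARROWS: the four slope characters and their single direction
def pvArrow (ch : Char) : Option (Int × Int) :=
  if ch = '>' then some (0, 1)
  else if ch = '<' then some (0, -1)
  else if ch = 'v' then some (1, 0)
  else if ch = '^' then some (-1, 0)
  else none

-- _at(grid, r, c): bounds-checked cell access, None when out of range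
def pvAt (grid : List String) (r c : Int) : Option Char :=
  if 0 ≤ r ∧ r < (grid.length : Int) then
    if 0 ≤ c ∧ c < ((grid.getD r.toNat "").toList.length : Int) then
      some ((grid.getD r.toNat "").toList.getD c.toNat '.')
    else none
  else none

-- the body of _neighbors' loop: keep or drop one direction
def pvAdjFn (grid : List String) (r c : Int) (d : Int × Int) : Option (Int × Int) :=
  match pvAt grid (r + d.1) (c + d.2) with
  | none => none
  | some cell =>
    if cell = '#' then none
    else match pvArrow cell with
      | some a => if a = d then some (r + d.1, c + d.2) else none
      | none => some (r + d.1, c + d.2)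

-- _neighbors(grid, r, c); the current cell is read with a default '.'
-- (unreachable: every cell it is called on is in range)
def pvAdjB (grid : List String) (r c : Int) : List (Int × Int) :=
  let ch := (pvAt grid r c).getD '.'
  let dirs := match pvArrow ch with
    | some d => [d]
    | none => if ch = '*' then [] else [((0 : Int), (1 : Int)), (1, 0), (0, -1), (-1, 0)]
  dirs.filterMap (pvAdjFn grid r c)

-- weight of the frame stack, second component of the termination measure
def pvFramesWt : List ((Int × Int) × List (Int × Int)) → Nat
  | [] => 0
  | f :: rest => f.2.length + 1 + pvFramesWt rest

-- pvAt answers ↔ A's in_range test (needed by the guard below and the proofs)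
lemma pvRow_bounds (grid : List String) (r : Int) (h0 : 0 ≤ r) (hl : r < (grid.length : Int)) :
    pvRow grid r = (grid.getD r.toNat "").toList := by
  simp only [pvRow]
  rw [PySem.List.pyGet?_of_nonneg (h := h0)]
  simp [List.getD, List.getElem?_eq_getElem (by omega : r.toNat < grid.length)]

lemma pvInRange_iff (grid : List String) (r c : Int) :
    pvInRange grid r c = true ↔
      (0 ≤ r ∧ r < (grid.length : Int) ∧ 0 ≤ c ∧
        c < ((grid.getD r.toNat "").toList.length : Int)) := by
  simp only [pvInRange, PySem.List.len_eq, Bool.and_eq_true, decide_eq_true_eq]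
  constructor
  · rintro ⟨⟨⟨h0, hl⟩, hc0⟩, hcl⟩
    rw [pvRow_bounds _ _ h0 hl] at hcl
    exact ⟨h0, hl, hc0, hcl⟩
  · rintro ⟨h0, hl, hc0, hcl⟩
    refine ⟨⟨⟨h0, hl⟩, hc0⟩, ?_⟩
    rw [pvRow_bounds _ _ h0 hl]
    exact hcl

lemma pvAt_isSome_iff (grid : List String) (r c : Int) :
    (pvAt grid r c).isSome = true ↔ pvInRange grid r c = true := by
  rw [pvInRange_iff]
  simp only [pvAt]
  by_cases h1 : 0 ≤ r ∧ r < (grid.length : Int)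
  · rw [if_pos h1]
    by_cases h2 : 0 ≤ c ∧ c < ((grid.getD r.toNat "").toList.length : Int)
    · rw [if_pos h2]
      simp only [Option.isSome_some, true_iff]
      exact ⟨h1.1, h1.2, h2.1, h2.2⟩
    · rw [if_neg h2]
      simp only [Option.isSome_none, Bool.false_eq_true, false_iff]
      intro hcon
      exact h2 ⟨hcon.2.2.1, hcon.2.2.2⟩
  · rw [if_neg h1]
    simp only [Option.isSome_none, Bool.false_eq_true, false_iff]
    intro hcon
    exact h1 ⟨hcon.1, hcon.2.1⟩

-- B's main loop: iterative post-order DFS over an explicit stack of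
-- (node, pending-neighbours) frames (head = top of the Python list)
def pvDfsLoop (grid : List String) :
    List ((Int × Int) × List (Int × Int)) → PySem.Set (Int × Int) → List (Int × Int) →
      List (Int × Int)
  | [], _, out => out
  | (p, []) :: rest, visited, out => pvDfsLoop grid rest visited (out ++ [p])
  | (p, nb :: pend) :: rest, visited, out =>
      if hv : PySem.Set.contains visited nb then
        pvDfsLoop grid ((p, pend) :: rest) visited out
      else if hin : (pvAt grid nb.1 nb.2).isSome then
        -- the range guard only makes the recursion total; every pending
        -- neighbour comes from pvAdjB and is in range
        pvDfsLoop grid ((nb, pvAdjB grid nb.1 nb.2) :: (p, pend) :: rest)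
          (PySem.Set.add visited nb) out
      else
        pvDfsLoop grid ((p, pend) :: rest) visited out
  termination_by frames visited _ => (pvUnvis grid visited, pvFramesWt frames)
  decreasing_by
  · exact Prod.Lex.right _ (by simp [pvFramesWt])
  · exact Prod.Lex.right _ (by simp [pvFramesWt])
  · refine Prod.Lex.left _ _ ?_
    have hin' : pvInRange grid nb.1 nb.2 = true := (pvAt_isSome_iff grid nb.1 nb.2).1 hin
    have hnv : ¬ PySem.Set.contains visited (nb.1, nb.2) = true := by
      intro h; exact hv (by simpa using h)
    simpa using pvUnvis_lt grid visited nb.1 nb.2 hin' hnv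
  · exact Prod.Lex.right _ (by simp [pvFramesWt])

-- pos = {node: i for i, node in enumerate(order)}
def pvPosB (order : List (Int × Int)) : PySem.Dict (Int × Int) Nat :=
  (order.zipIdx).foldl (fun d p => PySem.Dict.insert d p.1 p.2) PySem.Dict.empty

mutual
-- dist(i) with its memo dict threaded through; `pos[nb]` is total with an
-- out-of-range default (a KeyError is impossible: every neighbour of an order
-- cell is in the order), and the `j < i` guard bounds the recursion.
def pvDistB (grid : List String) (order : List (Int × Int)) (pos : PySem.Dict (Int × Int) Nat)
    (i : Nat) (memo : PySem.Dict Nat Int) : Int × PySem.Dict Nat Int :=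
  match PySem.Dict.get? memo i with
  | some v => (v, memo)
  | none =>
    if i = 0 then (0, PySem.Dict.insert memo 0 0)
    else
      let p := order.getD i (0, 0)
      let r := pvDistFoldB grid order pos i (pvAdjB grid p.1 p.2) memo (-1)
      (r.1, PySem.Dict.insert r.2 i r.1)
termination_by (i, 1, 0)
decreasing_by
  exact Prod.Lex.right _ (Prod.Lex.left _ _ (by omega))

def pvDistFoldB (grid : List String) (order : List (Int × Int)) (pos : PySem.Dict (Int × Int) Nat)
    (i : Nat) (nbs : List (Int × Int)) (memo : PySem.Dict Nat Int) (res : Int) :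
    Int × PySem.Dict Nat Int :=
  match nbs with
  | [] => (res, memo)
  | nb :: rest =>
    let j := PySem.Dict.getD pos nb order.length
    if h : j < i then
      let r := pvDistB grid order pos j memo
      pvDistFoldB grid order pos i rest r.2 (max res (r.1 + 1))
    else
      pvDistFoldB grid order pos i rest memo res
termination_by (i, 0, nbs.length)
decreasing_by
  · exact Prod.Lex.left _ _ h
  · exact Prod.Lex.right _ (Prod.Lex.right _ (by simp))
  · exact Prod.Lex.right _ (Prod.Lex.right _ (by simp))
end

def part_1_alt (grid : List String) : Int :=
  let start : Int × Int := (0, PySem.Str.find (grid.headD "") ".")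
  let order := pvDfsLoop grid [(start, pvAdjB grid start.1 start.2)]
    (PySem.Set.add PySem.Set.empty start) []
  let pos := pvPosB order
  (pvDistB grid order pos (order.length - 1) PySem.Dict.empty).1

-- ===== PRECONDITION & SPEC =====
-- Pre_ excludes exactly the inputs on which A raises: the empty grid
-- (IndexError on grid[0]) and a first row without '.' (ValueError from .index).
def Pre_part_1 (grid : List String) : Prop :=
  grid ≠ [] ∧ '.' ∈ (grid.headD "").toList
instance (grid : List String) : Decidable (Pre_part_1 grid) := by unfold Pre_part_1; infer_instance

def pvWitness_part_1 : List String := [".#", ".."]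

def Spec_part_1 (grid : List String) (out : Int) : Prop := out = part_1_alt grid
instance (grid : List String) (out : Int) : Decidable (Spec_part_1 grid out) := by unfold Spec_part_1; infer_instance

-- ===== CLAIM (what is proved, stated in full; the proofs are below) =====
def Claim_equal_part_1 : Prop := ∀ (grid : List String), Dom_part_1 grid → Pre_part_1 grid → Spec_part_1 grid (part_1 grid)

-- ===== LEMMAS AND PROOFS =====

lemma pvTsortLoop_nil (grid : List String) (v : PySem.Set (Int × Int)) (s : List (Int × Int)) :
    pvTsortLoop grid [] v s = (v, s) := by
  rw [pvTsortLoop.eq_def]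

lemma pvTsortLoop_emit (grid : List String) (r c : Int) (rest : List PvEnt)
    (v : PySem.Set (Int × Int)) (s : List (Int × Int)) :
    pvTsortLoop grid (PvEnt.emit r c :: rest) v s = pvTsortLoop grid rest v (s ++ [(r, c)]) := by
  rw [pvTsortLoop.eq_def]

lemma pvTsortLoop_visit (grid : List String) (r c : Int) (rest : List PvEnt)
    (v : PySem.Set (Int × Int)) (s : List (Int × Int)) :
    pvTsortLoop grid (PvEnt.visit r c :: rest) v s =
      if v.contains (r, c) = true then pvTsortLoop grid rest v s
      else if pvInRange grid r c = true then
        pvTsortLoop grid ((pvAdj grid r c).map (fun p => PvEnt.visit p.1 p.2) ++ PvEnt.emit r c :: rest)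
          (v.add (r, c)) s
      else pvTsortLoop grid rest v s := by
  rw [pvTsortLoop.eq_def]
  split <;> split <;> simp_all

-- cell values agree where pvAt answers
lemma pvCell_of_pvAt (grid : List String) (r c : Int) (ch : Char)
    (h : pvAt grid r c = some ch) : pvCell grid r c = ch := by
  simp only [pvAt] at h
  by_cases h1 : 0 ≤ r ∧ r < (grid.length : Int)
  · rw [if_pos h1] at h
    by_cases h2 : 0 ≤ c ∧ c < ((grid.getD r.toNat "").toList.length : Int)
    · rw [if_pos h2] at h
      have hch : (grid.getD r.toNat "").toList.getD c.toNat '.' = ch := by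
        simpa using h
      simp only [pvCell, pvRow_bounds grid r h1.1 h1.2]
      rw [PySem.List.pyGet?_of_nonneg (h := h2.1)]
      have hcl : c.toNat < (grid.getD r.toNat "").toList.length := by omega
      rw [List.getElem?_eq_getElem hcl]
      rw [← hch, List.getD_eq_getElem _ _ hcl]
      rfl
    · rw [if_neg h2] at h; cases h
  · rw [if_neg h1] at h; cases h

lemma pvAt_none_iff (grid : List String) (r c : Int) :
    pvAt grid r c = none ↔ pvInRange grid r c = false := by
  constructor
  · intro h
    by_contra hc
    have : pvInRange grid r c = true := by
      cases hx : pvInRange grid r c with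
      | false => exact absurd hx hc
      | true => rfl
    have := (pvAt_isSome_iff grid r c).2 this
    rw [h] at this; simp at this
  · intro h
    cases hx : pvAt grid r c with
    | none => rfl
    | some ch =>
      have : (pvAt grid r c).isSome = true := by rw [hx]; rfl
      rw [pvAt_isSome_iff] at this
      rw [h] at this; cases this

lemma pvSlopes_of_arrow (ch : Char) (a : Int × Int) (h : pvArrow ch = some a) :
    pvSlopes ch = some [a] ∧ ch ≠ '*' := by
  simp only [pvArrow] at h
  split_ifs at h with h1 h2 h3 h4 <;> simp_all [pvSlopes]

lemma pvSlopes_of_not_arrow (ch : Char) (h : pvArrow ch = none) :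
    pvSlopes ch = if ch = '*' then some [] else none := by
  simp only [pvArrow] at h
  split_ifs at h with h1 h2 h3 h4 <;> simp_all [pvSlopes]

lemma pvFoldl_opt_append {α β : Type} (f : α → Option β) :
    ∀ (l : List α) (init : List β),
      l.foldl (fun acc d => (f d).elim acc (fun x => acc ++ [x])) init
        = init ++ l.filterMap f := by
  intro l
  induction l with
  | nil => intro init; simp
  | cons d t ih =>
    intro init
    rw [List.foldl_cons, List.filterMap_cons]
    cases hf : f d with
    | none => simp only [Option.elim_none]; exact ih init
    | some x => simp only [Option.elim_some]; rw [ih (init ++ [x])]; simp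

-- B's neighbour list is A's, wherever the current cell is in range
lemma pvAdjB_eq_pvAdj (grid : List String) (r c : Int)
    (h : (pvAt grid r c).isSome = true) : pvAdjB grid r c = pvAdj grid r c := by
  obtain ⟨ch, hch⟩ := Option.isSome_iff_exists.1 h
  have hcell : pvCell grid r c = ch := pvCell_of_pvAt grid r c ch hch
  simp only [pvAdjB, pvAdj, hch, hcell, Option.getD_some]
  have hdirs : (match pvArrow ch with
      | some d => [d]
      | none => if ch = '*' then [] else [((0 : Int), (1 : Int)), (1, 0), (0, -1), (-1, 0)]) =
      (match pvSlopes ch with | some ds => ds | none => pvMOV) := by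
    cases ha : pvArrow ch with
    | some a =>
      obtain ⟨hs, _⟩ := pvSlopes_of_arrow ch a ha
      rw [hs]
    | none =>
      have hs := pvSlopes_of_not_arrow ch ha
      by_cases hst : ch = '*'
      · rw [if_pos hst] at hs; rw [hs, if_pos hst]
      · rw [if_neg hst] at hs; rw [hs, if_neg hst]; rfl
  rw [hdirs]
  set dirs := (match pvSlopes ch with | some ds => ds | none => pvMOV) with hd
  have hbody : ∀ (acc : List (Int × Int)) (d : Int × Int), d ∈ dirs →
      (if !(pvInRange grid (r + d.1) (c + d.2)) then acc
       else
        if pvCell grid (r + d.1) (c + d.2) = '#' then acc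
        else if pvCell grid (r + d.1) (c + d.2) ≠ '*' ∧ (pvSlopes (pvCell grid (r + d.1) (c + d.2))).isSome ∧
            d ∉ (pvSlopes (pvCell grid (r + d.1) (c + d.2))).getD [] then acc
        else acc ++ [(r + d.1, c + d.2)]) =
      (pvAdjFn grid r c d).elim acc (fun x => acc ++ [x]) := by
    intro acc d _
    cases hat : pvAt grid (r + d.1) (c + d.2) with
    | none =>
      have hir : pvInRange grid (r + d.1) (c + d.2) = false := (pvAt_none_iff _ _ _).1 hat
      rw [hir]
      simp [pvAdjFn, hat]
    | some cell =>
      have hir : pvInRange grid (r + d.1) (c + d.2) = true := by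
        rw [← pvAt_isSome_iff]; rw [hat]; rfl
      have hcl : pvCell grid (r + d.1) (c + d.2) = cell := pvCell_of_pvAt _ _ _ _ hat
      rw [hir, hcl]
      simp only [Bool.not_true, Bool.false_eq_true, if_false]
      by_cases hh : cell = '#'
      · rw [if_pos hh]; simp [pvAdjFn, hat, hh]
      · rw [if_neg hh]
        cases ha : pvArrow cell with
        | some a =>
          obtain ⟨hs, hstar⟩ := pvSlopes_of_arrow cell a ha
          by_cases had : a = d
          · simp [pvAdjFn, hat, hh, ha, hs, hstar, had]
          · have hda : d ≠ a := fun h => had h.symm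
            simp [pvAdjFn, hat, hh, ha, hs, hstar, had, hda]
        | none =>
          have hs := pvSlopes_of_not_arrow cell ha
          by_cases hst : cell = '*'
          · subst hst
            simp [pvAdjFn, pvArrow, hat, hs]
          · rw [if_neg hst] at hs
            simp [pvAdjFn, hat, hh, ha, hs, hst]
  rw [PySem.List.foldl_congr_mem _ _ _ _ hbody]
  rw [pvFoldl_opt_append (f := pvAdjFn grid r c)]
  simp

-- emitted cells among pending work-list entries
def pvEmits : List PvEnt → List (Int × Int)
  | [] => []
  | PvEnt.emit r c :: rest => (r, c) :: pvEmits rest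
  | PvEnt.visit _ _ :: rest => pvEmits rest

lemma pvEmits_append (P Q : List PvEnt) : pvEmits (P ++ Q) = pvEmits P ++ pvEmits Q := by
  induction P with
  | nil => rfl
  | cons e rest ih => cases e <;> simp [pvEmits, ih]

lemma pvEmits_map_visit (l : List (Int × Int)) :
    pvEmits (l.map (fun p => PvEnt.visit p.1 p.2)) = [] := by
  induction l with
  | nil => rfl
  | cons x rest ih => simp [pvEmits, ih]

lemma pvTsort_nodup (grid : List String) (P : List PvEnt) (v : PySem.Set (Int × Int))
    (s : List (Int × Int)) (hv : v.Nodup) (hse : (s ++ pvEmits P).Nodup)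
    (hsub : ∀ x ∈ s ++ pvEmits P, x ∈ v) :
    (pvTsortLoop grid P v s).2.Nodup := by
  revert hv hse hsub
  fun_induction pvTsortLoop grid P v s with
  | case1 visited stack =>
    intro _ hse _
    simpa [pvEmits] using hse
  | case2 r c rest visited stack ih =>
    intro hv hse hsub
    refine ih hv ?_ ?_
    · simpa [pvEmits] using hse
    · intro x hx
      exact hsub x (by simpa [pvEmits] using hx)
  | case3 r c rest visited stack hcv ih =>
    intro hv hse hsub
    refine ih hv (by simpa [pvEmits] using hse) ?_
    intro x hx
    exact hsub x (by simpa [pvEmits] using hx)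
  | case4 r c rest visited stack hcv hin ih =>
    intro hv hse hsub
    have hnotv : (r, c) ∉ visited := by
      intro hmem
      exact hcv ((PySem.Set.contains_iff visited (r, c)).2 hmem)
    have hse' : (stack ++ pvEmits rest).Nodup := by simpa [pvEmits] using hse
    have hsub' : ∀ x ∈ stack ++ pvEmits rest, x ∈ visited := by
      intro x hx
      exact hsub x (by simpa [pvEmits] using hx)
    have hfresh : (r, c) ∉ stack ++ pvEmits rest := fun hx => hnotv (hsub' _ hx)
    refine ih (PySem.Set.nodup_add visited (r, c) hv) ?_ ?_
    · rw [pvEmits_append, pvEmits_map_visit]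
      simp only [pvEmits, List.nil_append]
      exact List.nodup_middle.2 (List.nodup_cons.2 ⟨hfresh, hse'⟩)
    · intro x hx
      rw [pvEmits_append, pvEmits_map_visit] at hx
      simp only [pvEmits, List.nil_append] at hx
      rcases List.mem_append.1 hx with h1 | h2
      · exact (PySem.Set.mem_add visited (r, c) x).2 (Or.inl (hsub' x (List.mem_append.2 (Or.inl h1))))
      · rcases List.mem_cons.1 h2 with rfl | h3
        · exact (PySem.Set.mem_add visited (r, c) _).2 (Or.inr rfl)
        · exact (PySem.Set.mem_add visited (r, c) x).2 (Or.inl (hsub' x (List.mem_append.2 (Or.inr h3))))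
  | case5 r c rest visited stack hcv hin ih =>
    intro hv hse hsub
    refine ih hv (by simpa [pvEmits] using hse) ?_
    intro x hx
    exact hsub x (by simpa [pvEmits] using hx)

-- every cell on the resulting stack is in range
lemma pvTsort_inRange (grid : List String) (P : List PvEnt) (v : PySem.Set (Int × Int))
    (s : List (Int × Int)) (hs : ∀ x ∈ s ++ pvEmits P, pvInRange grid x.1 x.2 = true) :
    ∀ x ∈ (pvTsortLoop grid P v s).2, pvInRange grid x.1 x.2 = true := by
  revert hs
  fun_induction pvTsortLoop grid P v s with
  | case1 visited stack =>
    intro hs x hx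
    exact hs x (List.mem_append.2 (Or.inl hx))
  | case2 r c rest visited stack ih =>
    intro hs x hx
    refine ih ?_ x hx
    intro y hy
    refine hs y ?_
    rcases List.mem_append.1 hy with h1 | h2
    · rcases List.mem_append.1 h1 with h3 | h4
      · exact List.mem_append.2 (Or.inl h3)
      · exact List.mem_append.2 (Or.inr (by simp [pvEmits, List.mem_singleton.1 h4]))
    · exact List.mem_append.2 (Or.inr (by simp [pvEmits, h2]))
  | case3 r c rest visited stack hcv ih =>
    intro hs x hx
    refine ih ?_ x hx
    intro y hy
    exact hs y (by simpa [pvEmits] using hy)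
  | case4 r c rest visited stack hcv hin ih =>
    intro hs x hx
    refine ih ?_ x hx
    intro y hy
    rcases List.mem_append.1 hy with h1 | h2
    · exact hs y (List.mem_append.2 (Or.inl h1))
    · rw [pvEmits_append, pvEmits_map_visit] at h2
      simp only [pvEmits, List.nil_append] at h2
      rcases List.mem_cons.1 h2 with rfl | h3
      · exact hin
      · exact hs y (List.mem_append.2 (Or.inr (by simp [pvEmits, h3])))
  | case5 r c rest visited stack hcv hin ih =>
    intro hs x hx
    refine ih ?_ x hx
    intro y hy
    exact hs y (by simpa [pvEmits] using hy)

lemma pvTsortLoop_append (grid : List String) (P Q : List PvEnt)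
    (v : PySem.Set (Int × Int)) (s : List (Int × Int)) :
    pvTsortLoop grid (P ++ Q) v s =
      pvTsortLoop grid Q (pvTsortLoop grid P v s).1 (pvTsortLoop grid P v s).2 := by
  fun_induction pvTsortLoop grid P v s with
  | case1 visited stack => rfl
  | case2 r c rest visited stack ih =>
    rw [List.cons_append, pvTsortLoop_emit, ih]
  | case3 r c rest visited stack hv ih =>
    rw [List.cons_append, pvTsortLoop_visit]
    simp only [hv, if_true]
    rw [ih]
  | case4 r c rest visited stack hv hin ih =>
    rw [List.cons_append, pvTsortLoop_visit]
    simp only [hv, hin, Bool.false_eq_true, if_false]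
    simp only [List.append_assoc, List.cons_append] at ih ⊢
    exact ih
  | case5 r c rest visited stack hv hin ih =>
    rw [List.cons_append, pvTsortLoop_visit]
    simp only [hv, hin, Bool.false_eq_true, if_false]
    exact ih

-- flatten B's frame stack into A's work list
def pvFlat : List ((Int × Int) × List (Int × Int)) → List PvEnt
  | [] => []
  | (p, l) :: rest => l.map (fun q => PvEnt.visit q.1 q.2) ++ PvEnt.emit p.1 p.2 :: pvFlat rest

-- B's iterative DFS simulates A's work-list DFS step for step
lemma pvDfs_sim (grid : List String) (frames : List ((Int × Int) × List (Int × Int)))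
    (visited : PySem.Set (Int × Int)) (out : List (Int × Int)) :
    pvDfsLoop grid frames visited out = (pvTsortLoop grid (pvFlat frames) visited out).2 := by
  fun_induction pvDfsLoop grid frames visited out with
  | case1 visited out =>
    rw [pvFlat, pvTsortLoop_nil]
  | case2 p rest visited out ih =>
    rw [ih]
    rw [show pvFlat ((p, []) :: rest) = PvEnt.emit p.1 p.2 :: pvFlat rest from by simp [pvFlat]]
    rw [pvTsortLoop_emit]
  | case3 p nb pend rest visited out hv ih =>
    rw [ih]
    rw [show pvFlat ((p, nb :: pend) :: rest) =
      PvEnt.visit nb.1 nb.2 :: pvFlat ((p, pend) :: rest) from by simp [pvFlat]]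
    rw [pvTsortLoop_visit]
    rw [if_pos (by simpa using hv)]
  | case4 p nb pend rest visited out hv hin ih =>
    rw [ih]
    rw [show pvFlat ((p, nb :: pend) :: rest) =
      PvEnt.visit nb.1 nb.2 :: pvFlat ((p, pend) :: rest) from by simp [pvFlat]]
    rw [pvTsortLoop_visit]
    rw [if_neg (by simpa using hv), if_pos ((pvAt_isSome_iff grid nb.1 nb.2).1 hin)]
    rw [show pvFlat ((nb, pvAdjB grid nb.1 nb.2) :: (p, pend) :: rest) =
      (pvAdjB grid nb.1 nb.2).map (fun q => PvEnt.visit q.1 q.2) ++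
        PvEnt.emit nb.1 nb.2 :: pvFlat ((p, pend) :: rest) from by simp [pvFlat]]
    rw [pvAdjB_eq_pvAdj grid nb.1 nb.2 hin]
  | case5 p nb pend rest visited out hv hin ih =>
    rw [ih]
    rw [show pvFlat ((p, nb :: pend) :: rest) =
      PvEnt.visit nb.1 nb.2 :: pvFlat ((p, pend) :: rest) from by simp [pvFlat]]
    rw [pvTsortLoop_visit]
    rw [if_neg (by simpa using hv)]
    rw [if_neg (by
      intro hc
      exact hin ((pvAt_isSome_iff grid nb.1 nb.2).2 hc))]

-- the DP value at position i of the order: 0 at position 0, otherwise the max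
-- over backward edges of value+1 (with -1 when there is none)
def pvD (grid : List String) (S : List (Int × Int)) : Nat → Int
  | 0 => 0
  | (i+1) =>
    let p := S.getD (i+1) (0, 0)
    ((((pvAdj grid p.1 p.2).filter (fun nb => decide (S.idxOf nb < i+1))).attach.map
      (fun nb => pvD grid S (S.idxOf nb.1) + 1)).foldl max (-1))
termination_by i => i
decreasing_by
  have := nb.2
  simp only [List.mem_filter, decide_eq_true_eq] at this
  omega

lemma pvD_fold (grid : List String) (S : List (Int × Int)) (k : Nat) :
    (pvAdj grid (S.getD (k+1) (0, 0)).1 (S.getD (k+1) (0, 0)).2).foldl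
      (fun res nb => if S.idxOf nb < k+1 then max res (pvD grid S (S.idxOf nb) + 1) else res) (-1)
      = pvD grid S (k+1) := by
  rw [pvD]
  rw [PySem.List.foldl_ite_eq_foldl_filter]
  rw [List.attach_map_val (f := fun y => pvD grid S (List.idxOf y S) + 1), List.foldl_map]

lemma pvFoldA_char (grid : List String) (S : List (Int × Int)) (hS : S.Nodup) :
    ∀ (n m : Nat) (d : PySem.Dict (Int × Int) Int), m + n = S.length → 1 ≤ m →
    (∀ q : Int × Int, PySem.Dict.get? d q =
      if S.idxOf q < m then some (pvD grid S (S.idxOf q)) else none) →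
    ∀ q : Int × Int, PySem.Dict.get? ((S.drop m).foldl (fun d p =>
        PySem.Dict.insert d p ((pvAdj grid p.1 p.2).foldl (fun dist nb =>
          match PySem.Dict.get? d nb with
          | none => dist
          | some v => max dist (v + 1)) (-1))) d) q =
      if S.idxOf q < S.length then some (pvD grid S (S.idxOf q)) else none := by
  intro n
  induction n with
  | zero =>
    intro m d hmn hm hd q
    have hm' : m = S.length := by omega
    subst hm'
    simpa [List.drop_length] using hd q
  | succ n ihn =>
    intro m d hmn hm hd q
    have hmlt : m < S.length := by omega
    rw [List.drop_eq_getElem_cons hmlt, List.foldl_cons]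
    refine ihn (m + 1) _ (by omega) (by omega) ?_ q
    intro q'
    rw [PySem.Dict.get?_insert]
    have hidxm : S.idxOf S[m] = m := List.Nodup.idxOf_getElem hS m hmlt
    by_cases hq : q' = S[m]
    · subst hq
      rw [if_pos rfl, hidxm, if_pos (by omega : m < m + 1)]
      congr 1
      obtain ⟨k, rfl⟩ : ∃ k, m = k + 1 := ⟨m - 1, by omega⟩
      have hget : S.getD (k + 1) (0, 0) = S[k + 1] := List.getD_eq_getElem S (0, 0) hmlt
      have hcongr : ∀ (dist : Int) (nb : Int × Int), nb ∈ pvAdj grid (S[k+1]).1 (S[k+1]).2 →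
          (match PySem.Dict.get? d nb with
            | none => dist
            | some v => max dist (v + 1)) =
          if S.idxOf nb < k + 1 then max dist (pvD grid S (S.idxOf nb) + 1) else dist := by
        intro dist nb _
        rw [hd nb]
        by_cases hnb : S.idxOf nb < k + 1
        · simp [hnb]
        · simp [hnb]
      rw [PySem.List.foldl_congr_mem _ _ _ _ hcongr]
      rw [← hget] at *
      exact pvD_fold grid S k
    · rw [if_neg hq, hd q']
      have hne : S.idxOf q' ≠ m := by
        intro he
        have hlt : S.idxOf q' < S.length := by omega
        have h3 := List.getElem_idxOf hlt
        simp only [he] at h3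
        exact hq h3.symm
      by_cases h1 : S.idxOf q' < m
      · rw [if_pos h1, if_pos (by omega)]
      · rw [if_neg h1, if_neg (by omega)]

lemma pvPos_aux (xs : List (Int × Int)) :
    ∀ (k : Nat) (d : PySem.Dict (Int × Int) Nat), xs.Nodup →
    ∀ q, PySem.Dict.get? ((xs.zipIdx k).foldl (fun d p => PySem.Dict.insert d p.1 p.2) d) q =
      if q ∈ xs then some (k + xs.idxOf q) else PySem.Dict.get? d q := by
  induction xs with
  | nil => intro k d _ q; simp
  | cons x rest ih =>
    intro k d hnd q
    rw [List.zipIdx_cons, List.foldl_cons]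
    have hnd' := (List.nodup_cons.1 hnd).2
    have hxr : x ∉ rest := (List.nodup_cons.1 hnd).1
    rw [ih (k + 1) _ hnd' q]
    by_cases hq : q ∈ rest
    · have hqx : q ≠ x := fun he => hxr (he ▸ hq)
      rw [if_pos hq, if_pos (List.mem_cons.2 (Or.inr hq))]
      rw [List.idxOf_cons_ne _ (by exact fun h => hqx h.symm)]
      congr 1
      omega
    · rw [if_neg hq, PySem.Dict.get?_insert]
      by_cases hqx : q = x
      · subst hqx
        rw [if_pos rfl, if_pos (List.mem_cons.2 (Or.inl rfl)), List.idxOf_cons_self]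
        simp
      · rw [if_neg hqx, if_neg (by simp [hqx, hq])]

lemma pvPos_get (S : List (Int × Int)) (hS : S.Nodup) (q : Int × Int) :
    PySem.Dict.get? (pvPosB S) q =
      if S.idxOf q < S.length then some (S.idxOf q) else none := by
  rw [pvPosB, pvPos_aux S 0 PySem.Dict.empty hS q]
  by_cases hq : q ∈ S
  · rw [if_pos hq, if_pos (List.idxOf_lt_length_iff.2 hq), Nat.zero_add]
  · rw [if_neg hq, if_neg (by rw [List.idxOf_eq_length hq]; omega)]
    exact PySem.Dict.get?_empty q

lemma pvDistFoldB_nil (grid : List String) (order : List (Int × Int))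
    (pos : PySem.Dict (Int × Int) Nat) (i : Nat) (memo : PySem.Dict Nat Int) (res : Int) :
    pvDistFoldB grid order pos i [] memo res = (res, memo) := by
  rw [pvDistFoldB.eq_def]

lemma pvDistFoldB_cons (grid : List String) (order : List (Int × Int))
    (pos : PySem.Dict (Int × Int) Nat) (i : Nat) (nb : Int × Int) (rest : List (Int × Int))
    (memo : PySem.Dict Nat Int) (res : Int) :
    pvDistFoldB grid order pos i (nb :: rest) memo res =
      if PySem.Dict.getD pos nb order.length < i then
        pvDistFoldB grid order pos i rest (pvDistB grid order pos (PySem.Dict.getD pos nb order.length) memo).2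
          (max res ((pvDistB grid order pos (PySem.Dict.getD pos nb order.length) memo).1 + 1))
      else pvDistFoldB grid order pos i rest memo res := by
  rw [pvDistFoldB.eq_def]
  split <;> simp_all

lemma pvDistB_eq (grid : List String) (order : List (Int × Int))
    (pos : PySem.Dict (Int × Int) Nat) (i : Nat) (memo : PySem.Dict Nat Int) :
    pvDistB grid order pos i memo =
      match PySem.Dict.get? memo i with
      | some v => (v, memo)
      | none =>
        if i = 0 then ((0 : Int), PySem.Dict.insert memo 0 0)
        else
          let p := order.getD i (0, 0)
          let r := pvDistFoldB grid order pos i (pvAdjB grid p.1 p.2) memo (-1)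
          (r.1, PySem.Dict.insert r.2 i r.1) := by
  rw [pvDistB.eq_def]

def pvMemoOK (grid : List String) (S : List (Int × Int)) (memo : PySem.Dict Nat Int) : Prop :=
  ∀ j v, PySem.Dict.get? memo j = some v → v = pvD grid S j

lemma pvDistFoldB_spec (grid : List String) (S : List (Int × Int)) (hS : S.Nodup)
    (i : Nat) (hi : i < S.length)
    (IH : ∀ j, j < i → ∀ memo, pvMemoOK grid S memo →
      (pvDistB grid S (pvPosB S) j memo).1 = pvD grid S j ∧
        pvMemoOK grid S (pvDistB grid S (pvPosB S) j memo).2) :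
    ∀ (nbs : List (Int × Int)) (memo : PySem.Dict Nat Int) (res : Int),
      pvMemoOK grid S memo →
      (pvDistFoldB grid S (pvPosB S) i nbs memo res).1 =
        nbs.foldl (fun r nb => if S.idxOf nb < i then max r (pvD grid S (S.idxOf nb) + 1) else r) res ∧
      pvMemoOK grid S (pvDistFoldB grid S (pvPosB S) i nbs memo res).2 := by
  intro nbs
  induction nbs with
  | nil =>
    intro memo res hM
    rw [pvDistFoldB_nil, List.foldl_nil]
    exact ⟨rfl, hM⟩
  | cons nb rest ih =>
    intro memo res hM
    rw [pvDistFoldB_cons, List.foldl_cons]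
    have hgd : PySem.Dict.getD (pvPosB S) nb S.length =
        if S.idxOf nb < S.length then S.idxOf nb else S.length := by
      rw [PySem.Dict.getD_eq_get?_getD, pvPos_get S hS nb]
      by_cases h : S.idxOf nb < S.length <;> simp [h]
    by_cases hmem : S.idxOf nb < S.length
    · rw [if_pos hmem] at hgd
      rw [hgd]
      by_cases hj : S.idxOf nb < i
      · rw [if_pos hj, if_pos hj]
        obtain ⟨h1, h2⟩ := IH (S.idxOf nb) hj memo hM
        rw [h1]
        exact ih _ _ h2
      · rw [if_neg hj, if_neg hj]
        exact ih _ _ hM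
    · rw [if_neg hmem] at hgd
      rw [hgd, if_neg (by omega), if_neg (by omega)]
      exact ih _ _ hM

lemma pvDistB_correct (grid : List String) (S : List (Int × Int)) (hS : S.Nodup)
    (hR : ∀ p ∈ S, pvInRange grid p.1 p.2 = true) :
    ∀ (i : Nat), i < S.length → ∀ memo, pvMemoOK grid S memo →
      (pvDistB grid S (pvPosB S) i memo).1 = pvD grid S i ∧
        pvMemoOK grid S (pvDistB grid S (pvPosB S) i memo).2 := by
  intro i
  induction i using Nat.strong_induction_on with
  | _ i IH =>
  intro hi memo hM
  rw [pvDistB_eq]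
  cases hmemo : PySem.Dict.get? memo i with
  | some v => exact ⟨hM i v hmemo, hM⟩
  | none =>
    by_cases h0 : i = 0
    · subst h0
      rw [if_pos rfl]
      refine ⟨by simp [pvD], ?_⟩
      intro j v hj
      rw [PySem.Dict.get?_insert] at hj
      by_cases hj0 : j = 0
      · subst hj0
        rw [if_pos rfl] at hj
        cases hj
        simp [pvD]
      · rw [if_neg hj0] at hj
        exact hM j v hj
    · rw [if_neg h0]
      obtain ⟨k, rfl⟩ : ∃ k, i = k + 1 := ⟨i - 1, by omega⟩
      have hmemS : S.getD (k + 1) (0, 0) ∈ S := by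
        rw [List.getD_eq_getElem S (0, 0) hi]
        exact List.getElem_mem hi
      have hAdjEq : pvAdjB grid (S.getD (k + 1) (0, 0)).1 (S.getD (k + 1) (0, 0)).2 =
          pvAdj grid (S.getD (k + 1) (0, 0)).1 (S.getD (k + 1) (0, 0)).2 := by
        refine pvAdjB_eq_pvAdj grid _ _ ?_
        rw [pvAt_isSome_iff]
        exact hR _ hmemS
      have hspec := pvDistFoldB_spec grid S hS (k + 1) hi
        (fun j hj memo' hM' => IH j hj (by omega) memo' hM')
        (pvAdj grid (S.getD (k + 1) (0, 0)).1 (S.getD (k + 1) (0, 0)).2) memo (-1) hM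
      obtain ⟨h1, h2⟩ := hspec
      simp only [hAdjEq]
      constructor
      · rw [h1]
        exact pvD_fold grid S k
      · intro j v hj
        rw [PySem.Dict.get?_insert] at hj
        by_cases hjk : j = k + 1
        · subst hjk
          rw [if_pos rfl] at hj
          cases hj
          rw [h1]
          exact pvD_fold grid S k
        · rw [if_neg hjk] at hj
          exact h2 j v hj

lemma pvStart_inRange (grid : List String) (hpre : Pre_part_1 grid) :
    pvInRange grid 0 (PySem.Str.find (grid.headD "") ".") = true := by
  obtain ⟨hne, hdot⟩ := hpre
  obtain ⟨g, gs, rfl⟩ : ∃ g gs, grid = g :: gs := by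
    cases grid with
    | nil => exact absurd rfl hne
    | cons g gs => exact ⟨g, gs, rfl⟩
  simp only [List.headD_cons] at hdot ⊢
  have hrow0 : pvRow (g :: gs) 0 = g.toList := by
    simp [pvRow]
  have hinfix : ['.'] <:+: g.toList := by
    obtain ⟨l₁, l₂, hsplit⟩ := List.append_of_mem hdot
    exact ⟨l₁, l₂, by rw [hsplit]; simp⟩
  have hfind0 : 0 ≤ PySem.Str.find g "." := by
    rw [PySem.Str.find_nonneg_iff]
    simpa using hinfix
  have hfindlt : PySem.Str.find g "." < (g.toList.length : Int) := by
    have hle := PySem.Chars.find_le_length g.toList ['.']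
    rcases lt_or_eq_of_le hle with h | h
    · simpa using h
    · exfalso
      have hspec := PySem.Chars.find_spec (s := g.toList) (sub := ['.']) (by simpa using hfind0)
      rw [show PySem.Chars.find g.toList ['.'] = (g.toList.length : Int) from h] at hspec
      have h1 := hspec.1
      rw [show Int.toNat (g.toList.length : Int) = g.toList.length from by omega,
        List.drop_length] at h1
      simp at h1
  simp only [pvInRange, PySem.List.len_eq, hrow0, Bool.and_eq_true, decide_eq_true_eq]
  refine ⟨⟨⟨by omega, by simp⟩, hfind0⟩, ?_⟩
  simpa using hfindlt

lemma pvGetEmpty_eq (grid : List String) (hne : grid ≠ []) :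
    pvGetEmpty grid 0 = (0, PySem.Str.find (grid.headD "") ".") := by
  obtain ⟨g, gs, rfl⟩ : ∃ g gs, grid = g :: gs := by
    cases grid with
    | nil => exact absurd rfl hne
    | cons g gs => exact ⟨g, gs, rfl⟩
  simp [pvGetEmpty]

lemma pvTopoStack_decomp (grid : List String) (hpre : Pre_part_1 grid) :
    ∃ s' : List (Int × Int), pvTopoStack grid = s' ++ [pvGetEmpty grid 0] := by
  have hin := pvStart_inRange grid hpre
  have hge := pvGetEmpty_eq grid hpre.1
  rw [pvTopoStack, hge]
  simp only
  rw [pvTsortLoop_visit]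
  rw [if_neg (by simp [PySem.Set.empty]), if_pos hin]
  rw [pvTsortLoop_append]
  rw [pvTsortLoop_emit, pvTsortLoop_nil]
  exact ⟨_, rfl⟩

lemma pvTopoStack_nodup (grid : List String) : (pvTopoStack grid).Nodup := by
  rw [pvTopoStack]
  exact pvTsort_nodup grid _ _ _ (by simp [PySem.Set.empty]) (by simp [pvEmits]) (by simp [pvEmits])

-- B's order equals A's stack, under Pre_
lemma pvOrderB_eq (grid : List String) (hpre : Pre_part_1 grid) :
    pvDfsLoop grid [((0, PySem.Str.find (grid.headD "") "."),
        pvAdjB grid 0 (PySem.Str.find (grid.headD "") "."))]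
      (PySem.Set.add PySem.Set.empty (0, PySem.Str.find (grid.headD "") ".")) [] =
    pvTopoStack grid := by
  have hin := pvStart_inRange grid hpre
  have hge := pvGetEmpty_eq grid hpre.1
  have hadj : pvAdjB grid 0 (PySem.Str.find (grid.headD "") ".") =
      pvAdj grid 0 (PySem.Str.find (grid.headD "") ".") := by
    refine pvAdjB_eq_pvAdj grid _ _ ?_
    rw [pvAt_isSome_iff]; exact hin
  rw [pvDfs_sim, pvTopoStack, hge]
  simp only [pvFlat]
  rw [pvTsortLoop_visit]
  rw [if_neg (by simp [PySem.Set.empty]), if_pos hin, hadj]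

-- ===== VERDICT (by name: the statement is the Claim_ definition above) =====
theorem part_1_spec : Claim_equal_part_1 := by
  intro grid _ hpre
  unfold Spec_part_1
  have hnd := pvTopoStack_nodup grid
  obtain ⟨s', hdec⟩ := pvTopoStack_decomp grid hpre
  obtain ⟨first, rest, hS⟩ : ∃ f r, pvTopoStack grid = f :: r := by
    cases hX : pvTopoStack grid with
    | nil => rw [hX] at hdec; exact absurd hdec.symm (by simp)
    | cons f r => exact ⟨f, r, rfl⟩
  have hR : ∀ p ∈ pvTopoStack grid, pvInRange grid p.1 p.2 = true := by
    intro p hp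
    rw [pvTopoStack] at hp
    exact pvTsort_inRange grid _ _ _ (by simp [pvEmits]) p hp
  rw [hS] at hnd hdec
  have hstart_idx : List.idxOf (pvGetEmpty grid 0) (first :: rest) = rest.length := by
    have hnotmem : pvGetEmpty grid 0 ∉ s' := by
      have h2 := hnd
      rw [hdec] at h2
      intro hmem
      exact ((List.nodup_append.1 h2).2.2 _ hmem _ (List.mem_singleton_self _)) rfl
    have hslen : s'.length = rest.length := by
      have hl := congrArg List.length hdec
      simp at hl
      omega
    rw [hdec, List.idxOf_append, if_neg hnotmem, List.idxOf_cons_self]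
    omega
  have hbase : ∀ q, PySem.Dict.get? ((PySem.Dict.empty).insert first (0 : Int)) q =
      if List.idxOf q (first :: rest) < 1 then some (pvD grid (first :: rest) (List.idxOf q (first :: rest))) else none := by
    intro q
    rw [PySem.Dict.get?_insert]
    by_cases hq : q = first
    · subst hq
      rw [if_pos rfl, if_pos (by rw [List.idxOf_cons_self]; omega), List.idxOf_cons_self]
      simp [pvD]
    · rw [if_neg hq, PySem.Dict.get?_empty,
        if_neg (by rw [List.idxOf_cons_ne _ (fun h => hq h.symm)]; omega)]
  have hchar := pvFoldA_char grid (first :: rest) hnd rest.length 1 _ (by rw [List.length_cons]; omega) (le_refl 1) hbase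
  rw [show (first :: rest).drop 1 = rest from rfl] at hchar
  have hA : part_1 grid = pvD grid (first :: rest) rest.length := by
    simp only [part_1, hS]
    rw [PySem.Dict.getD_eq_get?_getD, hchar (pvGetEmpty grid 0), hstart_idx,
      if_pos (by simp), Option.getD_some]
  have hB : part_1_alt grid = pvD grid (first :: rest) rest.length := by
    simp only [part_1_alt]
    rw [pvOrderB_eq grid hpre, hS]
    have hR' : ∀ p ∈ first :: rest, pvInRange grid p.1 p.2 = true := by
      rw [← hS]; exact hR
    have hcorr := pvDistB_correct grid (first :: rest) hnd hR' ((first :: rest).length - 1)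
      (by simp) PySem.Dict.empty
      (by intro j v h; rw [PySem.Dict.get?_empty] at h; cases h)
    have hlen1 : (first :: rest).length - 1 = rest.length := by simp
    rw [hlen1] at hcorr
    simpa using hcorr.1
  rw [hA, hB]
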